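-- pv_equiv track=rewrite | github.com/michalg04/prompt-induced_hallucinations | general_utils.py | classify_final_row
-- ===== SOURCE A (Python) =====
-- def classify_final_row(is_correct, seq):
--     """
--     seq is the cleaned list of str like ["CB", "GT", ...]
--     """
--
--     # Category D: incorrect
--     if not is_correct:
--         return "D"
--
--     # If everything was NaN → treat as C (all GT)
--     if len(seq) == 0:
--         return "C"
--
--     # All CB
--     if all(x == "CB" for x in seq):
--         return "B"
--
--     # All GT
--     if all(x == "GT" for x in seq):
--         return "C"
--
--     # Category A: starts with CB
--     if seq[0] == "CB":
--         # A1: CB → GT → GT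
--         if all(x == "GT" for x in seq[1:]):
--             return "A"
--         # A2: CB → CB → GT
--         if len(seq) > 1 and seq[1] == "CB" and (len(seq)==2 or seq[2]=="GT"):
--             return "A"
--         # More general: first is CB, rest not containing flip GT→CB
--         if "GT" in seq[1:] and "CB" not in seq[1:]:
--             return "A"
--         if seq.count("CB") >= 1 and seq[-1] == "GT":
--             return "A"
--
--     # Mixed: starts with GT and flips to CB
--     if seq[0] == "GT" and "CB" in seq[1:]:
--         return "Mixed"
--
--     # fallback —
--     # if we get here, treat as C (all GT-like)
--     return "C"
-- ===== SOURCE B (Python) =====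
-- def classify_final_row(is_correct, seq):
--     """Classify via one scan of the tail collecting three flags, then a flat decision."""
--     if not is_correct:
--         return "D"
--     if not seq:
--         return "C"
--     first = seq[0]
--     tail_cb = tail_gt = tail_other = False
--     for x in seq[1:]:
--         if x == "CB":
--             tail_cb = True
--         elif x == "GT":
--             tail_gt = True
--         else:
--             tail_other = True
--     if first == "CB" and not tail_gt and not tail_other:
--         return "B"
--     if first == "GT" and not tail_cb and not tail_other:
--         return "C"
--     if first == "CB":
--         n = len(seq)
--         if (seq[-1] == "GT"
--                 or (tail_gt and not tail_cb)
--                 or (n >= 3 and seq[1] == "CB" and seq[2] == "GT")):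
--             return "A"
--         return "C"
--     if first == "GT" and tail_cb:
--         return "Mixed"
--     return "C"
-- ===== Notes on version B (the rewrite author's own statement) =====
-- stated objective: alternative
-- what changed: A's staged whole-sequence predicates (two all() scans, a count, and repeated seq[1:] slices rescanned for membership) are replaced by a single explicit loop over the tail accumulating three boolean flags (tail has CB / GT / other), from which every one of A's checks -- including the all-CB and all-GT cases -- is decided in one flat pass; A's four overlapping A-clauses collapse to one disjunction. Same asymptotic cost, different traversal structure.
import Mathlib
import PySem

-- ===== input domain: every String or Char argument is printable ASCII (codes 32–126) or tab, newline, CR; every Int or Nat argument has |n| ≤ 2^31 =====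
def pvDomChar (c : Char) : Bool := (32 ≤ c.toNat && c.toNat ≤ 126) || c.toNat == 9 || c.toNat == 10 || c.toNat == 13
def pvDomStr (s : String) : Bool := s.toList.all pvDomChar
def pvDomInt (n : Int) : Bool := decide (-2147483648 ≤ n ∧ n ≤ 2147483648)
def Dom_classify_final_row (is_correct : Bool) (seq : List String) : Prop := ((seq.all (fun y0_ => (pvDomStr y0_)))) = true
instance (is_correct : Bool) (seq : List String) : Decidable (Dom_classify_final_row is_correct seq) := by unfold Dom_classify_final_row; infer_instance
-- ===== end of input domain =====

-- B replaces A's staged whole-sequence scans (all(), count, repeated seq[1:] slices) by a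
-- single loop over the tail accumulating three flags, then one flat decision; objective: simpler.

-- ===== PORT A =====
-- A's fall-through after the CB branch: the Mixed check and the final "C"
def pvA_rest (seq : List String) : String :=
  if PySem.List.pyGetD seq 0 "" == "GT" && (PySem.List.slice seq (some 1) none).contains "CB" then "Mixed"
  else "C"

def classify_final_row (is_correct : Bool) (seq : List String) : String :=
  if !is_correct then "D"
  else if seq.length = 0 then "C"
  else if seq.all (fun x => x == "CB") then "B"
  else if seq.all (fun x => x == "GT") then "C"
  else if PySem.List.pyGetD seq 0 "" == "CB" then   -- seq[0] safe: length ≠ 0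
    if (PySem.List.slice seq (some 1) none).all (fun x => x == "GT") then "A"
    else if decide (seq.length > 1) && PySem.List.pyGetD seq 1 "" == "CB"
            && (decide (seq.length = 2) || PySem.List.pyGetD seq 2 "" == "GT") then "A"
    else if (PySem.List.slice seq (some 1) none).contains "GT"
            && !((PySem.List.slice seq (some 1) none).contains "CB") then "A"
    else if decide (1 ≤ PySem.List.count seq "CB") && PySem.List.pyGetD seq (-1) "" == "GT" then "A"
    else pvA_rest seq
  else pvA_rest seq

-- ===== PORT B =====
-- the loop body of Source B: fold the tail into the three flags (tail_cb, tail_gt, tail_other)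
def pvB_step (acc : Bool × Bool × Bool) (x : String) : Bool × Bool × Bool :=
  if x == "CB" then (true, acc.2.1, acc.2.2)
  else if x == "GT" then (acc.1, true, acc.2.2)
  else (acc.1, acc.2.1, true)

def classify_final_row_alt (is_correct : Bool) (seq : List String) : String :=
  if !is_correct then "D"
  else if seq.length = 0 then "C"
  else
    let first := PySem.List.pyGetD seq 0 ""
    let flags := (PySem.List.slice seq (some 1) none).foldl pvB_step (false, false, false)
    let tail_cb := flags.1
    let tail_gt := flags.2.1
    let tail_other := flags.2.2
    if first == "CB" && !tail_gt && !tail_other then "B"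
    else if first == "GT" && !tail_cb && !tail_other then "C"
    else if first == "CB" then
      if PySem.List.pyGetD seq (-1) "" == "GT"
          || (tail_gt && !tail_cb)
          || (decide (seq.length ≥ 3) && PySem.List.pyGetD seq 1 "" == "CB"
              && PySem.List.pyGetD seq 2 "" == "GT") then "A"
      else "C"
    else if first == "GT" && tail_cb then "Mixed"
    else "C"

-- ===== PRECONDITION & SPEC =====
def Spec_classify_final_row (is_correct : Bool) (seq : List String) (out : String) : Prop := out = classify_final_row_alt is_correct seq
instance (is_correct : Bool) (seq : List String) (out : String) : Decidable (Spec_classify_final_row is_correct seq out) := by unfold Spec_classify_final_row; infer_instance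

-- ===== CLAIM (what is proved, stated in full; the proofs are below) =====
def Claim_equal_classify_final_row : Prop := ∀ (is_correct : Bool) (seq : List String), Dom_classify_final_row is_correct seq → Spec_classify_final_row is_correct seq (classify_final_row is_correct seq)

-- ===== LEMMAS AND PROOFS =====
def pvOther (x : String) : Bool := !(x == "CB") && !(x == "GT")

-- the fold computes the three membership flags of the scanned list
theorem pvB_fold_eq (l : List String) (a b c : Bool) :
    l.foldl pvB_step (a, b, c)
      = (a || l.contains "CB", b || l.contains "GT", c || l.any pvOther) := by
  induction l generalizing a b c with
  | nil => simp
  | cons x t ih =>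
    simp only [List.foldl_cons, List.contains_cons, List.any_cons, ih, pvB_step]
    by_cases hx1 : x = "CB"
    · subst hx1; simp [pvOther]
    · by_cases hx2 : x = "GT"
      · subst hx2; simp [pvOther]
      · have e1 : ("CB" == x) = false := by simp [Ne.symm hx1]
        have e2 : ("GT" == x) = false := by simp [Ne.symm hx2]
        have e3 : pvOther x = true := by simp [pvOther, hx1, hx2]
        have e4 : (x == "CB") = false := by simp [hx1]
        have e5 : (x == "GT") = false := by simp [hx2]
        simp [e1, e2, e3, e4, e5]

-- all-CB / all-GT in terms of the flags
theorem pv_all_cb (l : List String) :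
    l.all (fun x => x == "CB") = (!(l.contains "GT") && !(l.any pvOther)) := by
  induction l with
  | nil => rfl
  | cons x t ih =>
    simp only [List.all_cons, List.contains_cons, List.any_cons, ih]
    by_cases hx1 : x = "CB"
    · subst hx1; simp [pvOther]
    · by_cases hx2 : x = "GT"
      · subst hx2; simp [pvOther]
      · have e2 : ("GT" == x) = false := by simp [Ne.symm hx2]
        have e3 : pvOther x = true := by simp [pvOther, hx1, hx2]
        have e4 : (x == "CB") = false := by simp [hx1]
        simp [e2, e3, e4]

theorem pv_all_gt (l : List String) :
    l.all (fun x => x == "GT") = (!(l.contains "CB") && !(l.any pvOther)) := by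
  induction l with
  | nil => rfl
  | cons x t ih =>
    simp only [List.all_cons, List.contains_cons, List.any_cons, ih]
    by_cases hx2 : x = "GT"
    · subst hx2; simp [pvOther]
    · by_cases hx1 : x = "CB"
      · subst hx1; simp [pvOther]
      · have e1 : ("CB" == x) = false := by simp [Ne.symm hx1]
        have e3 : pvOther x = true := by simp [pvOther, hx1, hx2]
        have e5 : (x == "GT") = false := by simp [hx2]
        simp [e1, e3, e5]

theorem all_last (l : List String) (h : l ≠ []) (hall : l.all (· == "GT") = true) : l.getLast h = "GT" := by
  have := List.getLast_mem h
  simp only [List.all_eq_true, beq_iff_eq] at hall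
  exact hall _ this

-- A's branch tree equals B's over the nine boolean atoms, given the relations the list facts supply:
-- h3 (head not both CB and GT), h4 (head CB gives a positive CB count), h1 (an all-GT nonempty tail
-- forces a GT last element), h2 (A's positional clause equals B's when the tail is not all-CB)
theorem pv_master (fCB fGT cg cc ao L a2 bp cnt : Bool)
    (h3 : fCB = true → fGT = false)
    (h4 : fCB = true → cnt = true)
    (h1 : fCB = true → (cg || ao) = true → (!cc && !ao) = true → L = true)
    (h2 : fCB = true → (cg || ao) = true → a2 = bp) :
    ((if fCB && (!cg && !ao) then "B"
      else if fGT && (!cc && !ao) then "C"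
      else if fCB then
        if !cc && !ao then "A"
        else if a2 then "A"
        else if cg && !cc then "A"
        else if cnt && L then "A"
        else if fGT && cc then "Mixed" else "C"
      else if fGT && cc then "Mixed" else "C") : String)
    = (if fCB && !cg && !ao then "B"
       else if fGT && !cc && !ao then "C"
       else if fCB then
         if L || cg && !cc || bp then "A" else "C"
       else if fGT && cc then "Mixed" else "C") := by
  revert h3 h4 h1 h2; revert fCB fGT cg cc ao L a2 bp cnt; decide

theorem pv_main : ∀ (ic : Bool) (seq : List String), classify_final_row ic seq = classify_final_row_alt ic seq := by
  intro ic seq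
  cases ic with
  | false => rfl
  | true =>
    cases seq with
    | nil => rfl
    | cons f t =>
      simp only [classify_final_row, classify_final_row_alt, pvA_rest]
      simp only [Bool.not_true, Bool.false_eq_true, if_false, PySem.List.slice_from_one,
        PySem.List.pyGetD_zero_cons, List.tail_cons, List.length_cons, pvB_fold_eq,
        Bool.false_or, List.all_cons, pv_all_cb, pv_all_gt]
      rw [if_neg (by omega : ¬ (t.length + 1 = 0)), if_neg (by omega : ¬ (t.length + 1 = 0))]
      refine pv_master (f == "CB") (f == "GT") (t.contains "GT") (t.contains "CB")
        (t.any pvOther) _ _ _ _ ?_ ?_ ?_ ?_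
      · intro h; have : f = "CB" := by simpa using h
        subst this; rfl
      · intro h; have : f = "CB" := by simpa using h
        subst this; simp [PySem.List.count_eq]
      · intro hcb hne hall
        have hfe : f = "CB" := by simpa using hcb
        subst hfe
        have htGT : t.all (fun x => x == "GT") = true := by rw [pv_all_gt]; exact hall
        have ht : t ≠ [] := by
          intro h; subst h; simp at hne
        rw [PySem.List.pyGetD_neg_one _ _ (List.cons_ne_nil _ _),
          List.getLast_cons ht, all_last t ht htGT]
        rfl
      · intro hcb hne
        have hfe : f = "CB" := by simpa using hcb
        subst hfe
        have htCB : t.all (fun x => x == "CB") = false := by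
          rw [pv_all_cb]
          cases hg : t.contains "GT" <;> cases ho : t.any pvOther <;>
            simp_all
        match t, htCB with
        | [g], htCB =>
          have hg : (g == "CB") = false := by simpa using htCB
          simp [pysem, hg]
        | g :: h :: v, _ =>
          simp [pysem]

-- ===== VERDICT (by name: the statement is the Claim_ definition above) =====
theorem classify_final_row_spec : Claim_equal_classify_final_row := by
  intro ic seq _
  unfold Spec_classify_final_row
  exact pv_main ic seq
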